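-- pv_equiv track=rewrite | github.com/anuragpeshne/ledger-grafana | server.py | __extract_hierarchical_account_names
-- ===== SOURCE A (Python) =====
-- def __extract_hierarchical_account_names(hierarchy_name: str) -> [str]:
--     if not hierarchy_name:
--         return []
--
--     last_colon_index = hierarchy_name.rfind(":")
--     if last_colon_index > -1:
--         result = __extract_hierarchical_account_names(hierarchy_name[:last_colon_index])
--         result.append(hierarchy_name)
--         return result
--     else:
--         return [hierarchy_name]
-- ===== SOURCE B (Python) =====
-- def __extract_hierarchical_account_names(hierarchy_name: str) -> [str]:
--     if not hierarchy_name: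
--         return []
--     result = []
--     for i, ch in enumerate(hierarchy_name):
--         if ch == ':' and i > 0:
--             result.append(hierarchy_name[:i])
--     result.append(hierarchy_name)
--     return result
-- ===== Notes on version B (the rewrite author's own statement) =====
-- stated objective: alternative
-- what changed: Replaced the right-recursion on the last colon (rfind) by a single iterative forward pass with enumerate that appends each proper colon prefix in increasing order and then the full name.
import Mathlib
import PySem

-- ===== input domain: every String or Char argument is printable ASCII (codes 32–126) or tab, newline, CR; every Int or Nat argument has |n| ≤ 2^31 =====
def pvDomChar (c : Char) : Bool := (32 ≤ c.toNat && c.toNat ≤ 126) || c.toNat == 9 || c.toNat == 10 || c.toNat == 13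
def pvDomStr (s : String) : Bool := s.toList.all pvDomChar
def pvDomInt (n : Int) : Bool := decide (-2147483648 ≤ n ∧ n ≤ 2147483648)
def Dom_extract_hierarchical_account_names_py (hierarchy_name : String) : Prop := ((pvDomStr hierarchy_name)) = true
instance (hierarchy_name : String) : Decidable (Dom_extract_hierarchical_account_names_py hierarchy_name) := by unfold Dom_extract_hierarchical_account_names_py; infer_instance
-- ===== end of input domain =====

-- B replaces A's right-recursion on rfind(':') by a single iterative forward pass over
-- enumerate(s) collecting each proper colon prefix; objective: alternative (iterative, no recursion).

-- ===== PORT A =====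
-- hand port of Python's s.rfind(":"): the HIGHEST index of ':' in the code-point list, or -1 (exact for this 1-char needle)
def pvLastColon : List Char → Int
  | [] => -1
  | c :: rest =>
      if pvLastColon rest > -1 then pvLastColon rest + 1
      else if c = ':' then 0 else -1

-- needed by the port's termination argument
theorem pvLastColon_lt (l : List Char) : pvLastColon l < l.length := by
  induction l with
  | nil => simp [pvLastColon]
  | cons c rest ih =>
    simp only [pvLastColon, List.length_cons]
    split_ifs <;> push_cast <;> omega

def extractAuxA (l : List Char) : List String :=
  if l = [] then []
  else
    if pvLastColon l > -1 then
      -- l[:i] with 0 ≤ i = pvLastColon l < len l is l.take i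
      extractAuxA (l.take (pvLastColon l).toNat) ++ [String.mk l]
    else [String.mk l]
termination_by l.length
decreasing_by
  have h := pvLastColon_lt l
  simp only [List.length_take]
  omega

def extract_hierarchical_account_names_py (hierarchy_name : String) : List String :=
  extractAuxA hierarchy_name.toList

-- ===== PORT B =====
def extract_hierarchical_account_names_py_alt (hierarchy_name : String) : List String :=
  let l := hierarchy_name.toList
  if l = [] then []
  else
    ((PySem.List.enumerate l).foldl
      (fun out p => if p.2 == ':' && decide (p.1 > 0) then out ++ [String.mk (l.take p.1.toNat)] else out)
      []) ++ [String.mk l]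

-- ===== PRECONDITION & SPEC =====
def Spec_extract_hierarchical_account_names_py (hierarchy_name : String) (out : List String) : Prop := out = extract_hierarchical_account_names_py_alt hierarchy_name
instance (hierarchy_name : String) (out : List String) : Decidable (Spec_extract_hierarchical_account_names_py hierarchy_name out) := by unfold Spec_extract_hierarchical_account_names_py; infer_instance

-- ===== CLAIM (what is proved, stated in full; the proofs are below) =====
def Claim_equal_extract_hierarchical_account_names_py : Prop := ∀ (hierarchy_name : String), Dom_extract_hierarchical_account_names_py hierarchy_name → Spec_extract_hierarchical_account_names_py hierarchy_name (extract_hierarchical_account_names_py hierarchy_name)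

-- ===== LEMMAS AND PROOFS =====

-- the proper colon-prefix cut points of l, in increasing order
def colonIdxs (l : List Char) : List Nat :=
  (List.range l.length).filter (fun i => l.getD i ' ' == ':' && decide (0 < i))

-- the common shape both programs produce on nonempty input
def specList (l : List Char) : List String :=
  (colonIdxs l).map (fun i => String.mk (l.take i)) ++ [String.mk l]

theorem pvLastColon_ge (l : List Char) : -1 ≤ pvLastColon l := by
  induction l with
  | nil => simp [pvLastColon]
  | cons c rest ih =>
    simp only [pvLastColon]
    split_ifs <;> omega

theorem getD_eq (l : List Char) (i : Nat) : l.getD i ' ' = l[i]?.getD ' ' := rfl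

theorem lc_neg (l : List Char) (h : pvLastColon l = -1) : ∀ j, l.getD j ' ' ≠ ':' := by
  induction l with
  | nil => intro j; simp [List.getD]
  | cons c rest ih =>
    have hg := pvLastColon_ge rest
    intro j
    simp only [pvLastColon] at h
    by_cases h1 : pvLastColon rest > -1
    · rw [if_pos h1] at h; omega
    · rw [if_neg h1] at h
      by_cases h2 : c = ':'
      · rw [if_pos h2] at h; omega
      · have hr : pvLastColon rest = -1 := by omega
        cases j with
        | zero => simpa [List.getD] using h2
        | succ k => simpa [List.getD] using ih hr k

theorem lc_pos (l : List Char) (h : pvLastColon l > -1) :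
    (pvLastColon l).toNat < l.length ∧ l.getD (pvLastColon l).toNat ' ' = ':' ∧
      ∀ j, (pvLastColon l).toNat < j → l.getD j ' ' ≠ ':' := by
  induction l with
  | nil => simp [pvLastColon] at h
  | cons c rest ih =>
    have hg := pvLastColon_ge rest
    by_cases h1 : pvLastColon rest > -1
    · obtain ⟨hlt, hcol, hmax⟩ := ih h1
      have hv : pvLastColon (c :: rest) = pvLastColon rest + 1 := by
        simp only [pvLastColon]; rw [if_pos h1]
      have ht : (pvLastColon (c :: rest)).toNat = (pvLastColon rest).toNat + 1 := by
        rw [hv]; omega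
      refine ⟨by rw [ht]; simp; omega, by rw [ht]; simpa [List.getD] using hcol, ?_⟩
      intro j hj
      rw [ht] at hj
      cases j with
      | zero => omega
      | succ k => simpa [List.getD] using hmax k (by omega)
    · by_cases h2 : c = ':'
      · have hv : pvLastColon (c :: rest) = 0 := by
          simp only [pvLastColon]; rw [if_neg h1, if_pos h2]
        rw [hv]
        refine ⟨by simp, by simpa [List.getD] using h2, ?_⟩
        intro j hj
        cases j with
        | zero => omega
        | succ k => simpa [List.getD] using lc_neg rest (by omega) k
      · exfalso
        have hv : pvLastColon (c :: rest) = -1 := by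
          simp only [pvLastColon]; rw [if_neg h1, if_neg h2]
        omega

theorem colonIdxs_no (l : List Char) (h : ∀ j, l.getD j ' ' ≠ ':') : colonIdxs l = [] := by
  unfold colonIdxs
  rw [List.filter_eq_nil_iff]
  intro i _
  have := h i
  rw [getD_eq] at this
  simp [this]

-- decomposition of colonIdxs at the last colon n
theorem colonIdxs_split (l : List Char) (n : Nat) (hn : n < l.length)
    (hc : l.getD n ' ' = ':') (hmax : ∀ j, n < j → l.getD j ' ' ≠ ':') :
    colonIdxs l = (List.range n).filter (fun i => l.getD i ' ' == ':' && decide (0 < i))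
      ++ (if 0 < n then [n] else []) := by
  unfold colonIdxs
  have hlen : l.length = (n + 1) + (l.length - (n + 1)) := by omega
  rw [hlen, List.range_add, List.filter_append, List.range_succ, List.filter_append]
  have h2 : ((List.range (l.length - (n + 1))).map (fun i => n + 1 + i)).filter
      (fun i => l.getD i ' ' == ':' && decide (0 < i)) = [] := by
    rw [List.filter_eq_nil_iff]
    intro i hi
    simp only [List.mem_map] at hi
    obtain ⟨k, _, rfl⟩ := hi
    have := hmax (n + 1 + k) (by omega)
    rw [getD_eq] at this
    simp [this]
  rw [h2, List.append_nil]
  congr 1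
  rw [getD_eq] at hc
  by_cases h0 : 0 < n <;> simp [hc, h0]

-- colon cut points of the prefix l.take n, when n is the last colon position
theorem colonIdxs_take (l : List Char) (n : Nat) (hn : n < l.length) :
    colonIdxs (l.take n) = (List.range n).filter (fun i => l.getD i ' ' == ':' && decide (0 < i)) := by
  unfold colonIdxs
  have hlen : (l.take n).length = n := by simp; omega
  rw [hlen]
  apply List.filter_congr
  intro i hi
  simp only [List.mem_range] at hi
  have : (l.take n).getD i ' ' = l.getD i ' ' := by
    rw [getD_eq, getD_eq, List.getElem?_take]
    simp [hi]
  rw [this]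

theorem specList_take (l : List Char) (n : Nat) (hn : n < l.length) :
    (colonIdxs (l.take n)).map (fun i => String.mk ((l.take n).take i))
      = ((List.range n).filter (fun i => l.getD i ' ' == ':' && decide (0 < i))).map
          (fun i => String.mk (l.take i)) := by
  rw [colonIdxs_take l n hn]
  apply List.map_congr_left
  intro i hi
  have hi' : i < n := List.mem_range.mp (List.mem_of_mem_filter hi)
  rw [List.take_take]
  congr 2
  omega

-- A produces the common shape, by strong induction on length
theorem A_char : ∀ (N : Nat) (l : List Char), l.length ≤ N → l ≠ [] → extractAuxA l = specList l := by
  intro N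
  induction N with
  | zero => intro l hl hne; cases l <;> simp_all
  | succ N ih =>
    intro l hl hne
    rw [extractAuxA]
    simp only [hne, if_false]
    by_cases h : pvLastColon l > -1
    · obtain ⟨hlt, hcol, hmax⟩ := lc_pos l h
      rw [if_pos h]
      unfold specList
      rw [colonIdxs_split l (pvLastColon l).toNat hlt hcol hmax]
      by_cases h0 : 0 < (pvLastColon l).toNat
      · have htne : l.take (pvLastColon l).toNat ≠ [] := by
          intro hcontra
          have := congrArg List.length hcontra
          rw [List.length_take] at this
          simp only [List.length_nil] at this
          omega
        have htlen : (l.take (pvLastColon l).toNat).length ≤ N := by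
          rw [List.length_take]; omega
        rw [ih (l.take (pvLastColon l).toNat) htlen htne]
        unfold specList
        rw [specList_take l (pvLastColon l).toNat hlt]
        simp [h0]
      · have hn0 : (pvLastColon l).toNat = 0 := by omega
        rw [hn0]
        simp only [List.take_zero]
        rw [extractAuxA]
        simp [hn0]
    · rw [if_neg h]
      have : pvLastColon l = -1 := by
        have := pvLastColon_ge l
        omega
      unfold specList
      rw [colonIdxs_no l (lc_neg l this)]
      simp

-- B's enumerate, concretely
theorem enumerate_eq_range (l : List Char) :
    PySem.List.enumerate l = (List.range l.length).map (fun i : Nat => ((i : Int), l.getD i ' ')) := by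
  apply List.ext_getElem
  · simp [PySem.List.length_enumerate]
  · intro k h1 h2
    have hk : k < l.length := by simpa [PySem.List.length_enumerate] using h1
    simp [PySem.List.getElem_enumerate, getD_eq, List.getElem?_eq_getElem hk]

-- B produces the common shape
theorem B_char (l : List Char) :
    ((PySem.List.enumerate l).foldl
      (fun out p => if p.2 == ':' && decide (p.1 > 0) then out ++ [String.mk (l.take p.1.toNat)] else out)
      []) ++ [String.mk l] = specList l := by
  rw [PySem.List.foldl_append_if, enumerate_eq_range, List.filter_map, List.map_map]
  unfold specList colonIdxs
  congr 1
  have hfe : ((fun p : Int × Char => p.2 == ':' && decide (p.1 > 0)) ∘ fun i : Nat => ((i : Int), l.getD i ' '))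
      = fun i : Nat => l.getD i ' ' == ':' && decide (0 < i) := by
    funext i
    simp
  rw [hfe]
  apply List.map_congr_left
  intro i _
  simp

-- ===== VERDICT (by name: the statement is the Claim_ definition above) =====
theorem extract_hierarchical_account_names_py_spec : Claim_equal_extract_hierarchical_account_names_py := by
  intro s _
  unfold Spec_extract_hierarchical_account_names_py extract_hierarchical_account_names_py
    extract_hierarchical_account_names_py_alt
  by_cases h : s.toList = []
  · rw [extractAuxA]
    simp [h]
  · simp only [h, if_false]
    rw [A_char s.toList.length s.toList le_rfl h, B_char s.toList]
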